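-- pv_equiv track=rewrite | github.com/IdrissHmz/Opt-BinPack-Resolver | BinPacking_v2/TB_me.py | eval_choix
-- ===== SOURCE A (Python) =====
-- def eval_choix(conf,items,c):
--   bin = set(conf)
--   bin_space = []
--   for b in bin:
--     indices = [index for index, element in enumerate(conf) if element == b]
--     s = sum([items[i] for i in indices])
--     bin_space.append(c-s)
--   return max(bin_space)
-- ===== SOURCE B (Python) =====
-- def eval_choix(conf, items, c):
--     space = {}
--     for i, b in enumerate(conf):
--         space[b] = space.get(b, 0) + items[i]
--     return max(c - s for s in space.values())
-- ===== Notes on version B (the rewrite author's own statement) =====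
-- stated objective: faster
-- what changed: Replaces the per-bin rescan of conf (for each distinct bin label, an enumerate-filter pass plus an indexed sum) by a single pass that accumulates per-bin item sums in a dict, then takes the max of c minus each sum.
import Mathlib
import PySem

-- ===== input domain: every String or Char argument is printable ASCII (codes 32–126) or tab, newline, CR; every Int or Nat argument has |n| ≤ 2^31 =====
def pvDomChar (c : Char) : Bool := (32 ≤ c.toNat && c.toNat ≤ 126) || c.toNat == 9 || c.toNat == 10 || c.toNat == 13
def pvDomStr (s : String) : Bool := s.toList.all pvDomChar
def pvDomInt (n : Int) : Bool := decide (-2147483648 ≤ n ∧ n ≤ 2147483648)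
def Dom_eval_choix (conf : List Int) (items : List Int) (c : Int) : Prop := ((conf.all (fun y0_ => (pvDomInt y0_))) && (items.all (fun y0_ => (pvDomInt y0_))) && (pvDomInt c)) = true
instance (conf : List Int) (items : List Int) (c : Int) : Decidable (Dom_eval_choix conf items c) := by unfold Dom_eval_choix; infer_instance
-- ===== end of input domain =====

-- B replaces A's per-distinct-bin rescan of conf by a single dict-accumulating pass (objective: faster, O(B*n) -> O(n)).


-- ===== PORT A =====
-- for b in set(conf): collect indices of conf equal to b, sum items at those indices, append c - s;
-- finally max(bin_space).  (max over the set's elements: order-independent, so the first-occurrence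
-- order of PySem.Set.ofList is exact.)  items[i] → pyGetD (in range under Pre_); max of [] → getD 0 (excluded by Pre_).
def eval_choix (conf : List Int) (items : List Int) (c : Int) : Int :=
  let bin : PySem.Set Int := PySem.Set.ofList conf
  let bin_space : List Int := bin.foldl (fun acc b =>
    let indices : List Int := ((PySem.List.enumerate conf 0).filter (fun p => p.2 == b)).map (fun p => p.1)
    let s : Int := (indices.map (fun i => PySem.List.pyGetD items i 0)).sum
    acc ++ [c - s]) []
  (PySem.List.max? bin_space (fun y => y)).getD 0

-- ===== PORT B =====
-- single pass: space[b] = space.get(b, 0) + items[i]; then max over c - s for the dict's values.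
def eval_choix_alt (conf : List Int) (items : List Int) (c : Int) : Int :=
  let space : PySem.Dict Int Int := (PySem.List.enumerate conf 0).foldl
    (fun d p => d.insert p.2 (d.getD p.2 0 + PySem.List.pyGetD items p.1 0)) PySem.Dict.empty
  (PySem.List.max? ((PySem.Dict.values space).map (fun s => c - s)) (fun y => y)).getD 0

-- ===== PRECONDITION & SPEC =====
-- Pre_ excludes exactly the inputs where A raises: conf = [] (max of an empty sequence, ValueError)
-- and len(items) < len(conf) (items[i] out of range, IndexError).  B raises on the same inputs.
def Pre_eval_choix (conf : List Int) (items : List Int) (c : Int) : Prop :=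
  conf ≠ [] ∧ conf.length ≤ items.length
instance (conf : List Int) (items : List Int) (c : Int) : Decidable (Pre_eval_choix conf items c) := by unfold Pre_eval_choix; infer_instance
def pvWitness_eval_choix : List Int × List Int × Int := ([1, 2, 1], [3, 4, 5], 10)

def Spec_eval_choix (conf : List Int) (items : List Int) (c : Int) (out : Int) : Prop := out = eval_choix_alt conf items c
instance (conf : List Int) (items : List Int) (c : Int) (out : Int) : Decidable (Spec_eval_choix conf items c out) := by unfold Spec_eval_choix; infer_instance

-- ===== CLAIM (what is proved, stated in full; the proofs are below) =====
def Claim_equal_eval_choix : Prop := ∀ (conf : List Int) (items : List Int) (c : Int), Dom_eval_choix conf items c → Pre_eval_choix conf items c → Spec_eval_choix conf items c (eval_choix conf items c)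

-- ===== LEMMAS AND PROOFS =====

-- B's accumulating dict looked up at b gives the sum of g over the pairs of l whose second component is b.
theorem getD_foldl_insert_add (l : List (Int × Int)) (g : Int × Int → Int) (d : PySem.Dict Int Int) (b : Int) :
    (l.foldl (fun d p => d.insert p.2 (d.getD p.2 0 + g p)) d).getD b 0
      = d.getD b 0 + ((l.filter (fun p => p.2 == b)).map g).sum := by
  induction l generalizing d with
  | nil => simp
  | cons p t ih =>
    simp only [List.foldl_cons, List.filter_cons]
    rw [ih]
    by_cases h : p.2 = b
    · simp [h]
      ring
    · have hne : (p.2 == b) = false := by simp [h]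
      have hne' : b ≠ p.2 := fun e => h e.symm
      simp [hne, PySem.Dict.getD_insert, hne']

theorem eval_choix_spec : Claim_equal_eval_choix := by
  intro conf items c _ _
  unfold Spec_eval_choix eval_choix eval_choix_alt
  simp only []
  -- A's loop is a map over set(conf)
  rw [PySem.List.foldl_append_singleton_eq_map]
  -- B's dict
  set F : PySem.Dict Int Int → Int × Int → PySem.Dict Int Int :=
    fun d p => d.insert p.2 (d.getD p.2 0 + PySem.List.pyGetD items p.1 0) with hF
  set d : PySem.Dict Int Int := (PySem.List.enumerate conf 0).foldl F PySem.Dict.empty with hd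
  have hnodup : d.keys.Nodup := by
    rw [hd, hF]
    exact PySem.Dict.nodup_keys_foldl_insert_key _ (fun p : Int × Int => p.2) _ _ PySem.Dict.nodup_keys_empty
  have hkeys : d.keys = PySem.Set.ofList conf := by
    rw [hd, hF, PySem.Dict.keys_foldl_insert_key]
    simp [PySem.List.map_snd_enumerate, PySem.Dict.keys_empty, PySem.Set.update,
      PySem.Set.ofList_eq_foldl]
  have hvals : PySem.Dict.values d = d.keys.map (fun k => d.getD k 0) :=
    PySem.Dict.values_eq_map_keys d hnodup 0
  rw [hvals, hkeys, List.map_map]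
  have hmaps : (PySem.Set.ofList conf).map
        (fun b => c - ((((PySem.List.enumerate conf 0).filter (fun p : Int × Int => p.2 == b)).map (fun p : Int × Int => p.1)).map (fun i => PySem.List.pyGetD items i 0)).sum)
      = (PySem.Set.ofList conf).map ((fun s => c - s) ∘ fun k => d.getD k 0) := by
    apply List.map_congr_left
    intro b _
    have hsum := getD_foldl_insert_add (PySem.List.enumerate conf 0)
        (fun p => PySem.List.pyGetD items p.1 0) PySem.Dict.empty b
    rw [hd, hF]
    simp only [Function.comp_apply]
    rw [hsum]
    simp [List.map_map, Function.comp_def, PySem.Dict.getD_empty]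
  rw [List.nil_append, hmaps]
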